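-- pv_equiv track=rewrite | github.com/BlockchainRev/RedditVideoMakerBot | video_creation/text_image_generator.py | create_large_text_chunks
-- ===== SOURCE A (Python) =====
-- def create_large_text_chunks(text, target_chunks=4):
--     """Split text into larger chunks for easier subtitle syncing"""
--     # Handle case where text might be a list
--     if isinstance(text, list):
--         text = ' '.join(str(item) for item in text)
--     elif not isinstance(text, str):
--         text = str(text)
--
--     # Clean the text
--     sentences = text.split('. ')
--     chunks = []
--
--     # Calculate roughly how many sentences per chunk
--     sentences_per_chunk = max(1, len(sentences) // target_chunks)
--
--     current_chunk = []
--     for i, sentence in enumerate(sentences):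
--         current_chunk.append(sentence.strip())
--
--         # Create chunk when we have enough sentences or at the end
--         if len(current_chunk) >= sentences_per_chunk or i == len(sentences) - 1:
--             if current_chunk:
--                 chunk_text = '. '.join(current_chunk)
--                 if chunk_text and not chunk_text.endswith('.'):
--                     chunk_text += '.'
--
--                 # Format for better readability (3-4 lines max)
--                 formatted_chunk = format_large_chunk(chunk_text)
--                 chunks.append(formatted_chunk)
--                 current_chunk = []
--
--     return chunks
--
-- def format_large_chunk(text):
--     """Format large text chunks for optimal readability (3-4 lines)"""
--     words = text.split()
--     if len(words) <= 8:
--         return text  # Keep short text as is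
--
--     # Target 3-4 lines with roughly equal length
--     words_per_line = len(words) // 3 if len(words) > 15 else len(words) // 2
--
--     lines = []
--     current_line = []
--
--     for word in words:
--         current_line.append(word)
--
--         # Break line when we have enough words or hit natural breaks
--         if len(current_line) >= words_per_line:
--             # Look for good break points
--             if word.endswith(('.', ',', '!', '?')) or len(current_line) > words_per_line + 2:
--                 lines.append(' '.join(current_line))
--                 current_line = []
--
--     # Add remaining words
--     if current_line:
--         lines.append(' '.join(current_line))
--
--     return '\n'.join(lines)
-- ===== SOURCE B (Python) =====
-- def create_large_text_chunks(text, target_chunks=4):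
--     """Split text into larger chunks for easier subtitle syncing"""
--     # Handle case where text might be a list
--     if isinstance(text, list):
--         text = ' '.join(str(item) for item in text)
--     elif not isinstance(text, str):
--         text = str(text)
--
--     sentences = text.split('. ')
--     sentences_per_chunk = max(1, len(sentences) // target_chunks)
--
--     # Slice the sentence list into fixed-size groups (remainder as final group)
--     # instead of maintaining a running accumulator.
--     chunks = []
--     for start in range(0, len(sentences), sentences_per_chunk):
--         group = [s.strip() for s in sentences[start:start + sentences_per_chunk]]
--         chunk_text = '. '.join(group)
--         if chunk_text and not chunk_text.endswith('.'):
--             chunk_text += '.'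
--         chunks.append(format_large_chunk(chunk_text))
--     return chunks
--
-- def format_large_chunk(text):
--     """Format large text chunks for optimal readability (3-4 lines)"""
--     words = text.split()
--     if len(words) <= 8:
--         return text  # Keep short text as is
--
--     words_per_line = len(words) // 3 if len(words) > 15 else len(words) // 2
--
--     lines = []
--     current_line = []
--     for word in words:
--         current_line.append(word)
--         if len(current_line) >= words_per_line:
--             if word.endswith(('.', ',', '!', '?')) or len(current_line) > words_per_line + 2:
--                 lines.append(' '.join(current_line))
--                 current_line = []
--     if current_line:
--         lines.append(' '.join(current_line))
--     return '\n'.join(lines)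
-- ===== Notes on version B (the rewrite author's own statement) =====
-- stated objective: simpler
-- what changed: Replaces A's running current_chunk accumulator with flush-on-boundary logic by directly slicing the sentence list into fixed-size groups with a strided range loop.
import Mathlib
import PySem

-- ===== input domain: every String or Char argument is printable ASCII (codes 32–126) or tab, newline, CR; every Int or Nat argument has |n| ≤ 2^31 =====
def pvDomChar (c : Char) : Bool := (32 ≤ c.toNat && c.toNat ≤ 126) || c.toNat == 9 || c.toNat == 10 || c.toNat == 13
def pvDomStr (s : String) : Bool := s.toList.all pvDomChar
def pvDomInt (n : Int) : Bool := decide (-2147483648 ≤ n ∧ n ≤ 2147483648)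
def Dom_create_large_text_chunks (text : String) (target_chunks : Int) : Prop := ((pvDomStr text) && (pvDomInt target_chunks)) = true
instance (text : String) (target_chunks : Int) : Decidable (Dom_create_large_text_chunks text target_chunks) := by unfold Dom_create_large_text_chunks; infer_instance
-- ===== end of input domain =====

-- B replaces A's running current_chunk accumulator by slicing the sentence list into
-- fixed-size groups with a strided range loop (objective: simpler decomposition, same cost).


-- ===== PORT A =====
-- helper from the same module, used verbatim by both A and B
def format_large_chunk (text : String) : String :=
  let words := PySem.Str.split₀ text
  if words.length ≤ 8 then text
  else
    -- len(words) // 3 on nonnegative ints is Nat division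
    let words_per_line := if words.length > 15 then words.length / 3 else words.length / 2
    let st := words.foldl (fun (st : List String × List String) word =>
      let current_line := st.2 ++ [word]
      if current_line.length ≥ words_per_line then
        if PySem.Str.endswith word "." || PySem.Str.endswith word "," ||
           PySem.Str.endswith word "!" || PySem.Str.endswith word "?" ||
           current_line.length > words_per_line + 2 then
          (st.1 ++ [PySem.Str.join " " current_line], [])
        else (st.1, current_line)
      else (st.1, current_line)) ([], [])
    let lines := if st.2 ≠ [] then st.1 ++ [PySem.Str.join " " st.2] else st.1
    PySem.Str.join "\n" lines

def create_large_text_chunks (text : String) (target_chunks : Int) : List String :=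
  -- text : String here, so the isinstance branches are identities
  -- sep ". " ≠ "", so split? always returns some
  let sentences := (PySem.Str.split? text ". ").getD []
  let sentences_per_chunk := max 1 (PySem.Int.floordiv (sentences.length : Int) target_chunks)
  let st := (PySem.List.enumerate sentences).foldl (fun (st : List String × List String) p =>
      let current_chunk := st.2 ++ [PySem.Str.strip p.2]
      if (current_chunk.length : Int) ≥ sentences_per_chunk ∨ p.1 = (sentences.length : Int) - 1 then
        if current_chunk ≠ [] then
          let chunk_text := PySem.Str.join ". " current_chunk
          -- '+' on str is String.append, exact
          let chunk_text := if chunk_text ≠ "" ∧ ¬ (PySem.Str.endswith chunk_text ".") then chunk_text ++ "." else chunk_text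
          (st.1 ++ [format_large_chunk chunk_text], [])
        else (st.1, current_chunk)
      else (st.1, current_chunk)) ([], [])
  st.1

-- ===== PORT B =====
def create_large_text_chunks_alt (text : String) (target_chunks : Int) : List String :=
  let sentences := (PySem.Str.split? text ". ").getD []
  let sentences_per_chunk := max 1 (PySem.Int.floordiv (sentences.length : Int) target_chunks)
  (PySem.List.pyRange 0 (sentences.length : Int) sentences_per_chunk).foldl (fun chunks start =>
      let group := (PySem.List.slice sentences (some start) (some (start + sentences_per_chunk))).map PySem.Str.strip
      let chunk_text := PySem.Str.join ". " group
      let chunk_text := if chunk_text ≠ "" ∧ ¬ (PySem.Str.endswith chunk_text ".") then chunk_text ++ "." else chunk_text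
      chunks ++ [format_large_chunk chunk_text]) []

-- ===== PRECONDITION & SPEC =====
-- Pre_ excludes only target_chunks = 0, where A raises ZeroDivisionError.
def Pre_create_large_text_chunks (text : String) (target_chunks : Int) : Prop := target_chunks ≠ 0
instance (text : String) (target_chunks : Int) : Decidable (Pre_create_large_text_chunks text target_chunks) := by unfold Pre_create_large_text_chunks; infer_instance

def pvWitness_create_large_text_chunks : String × Int := ("One two. Three. Four five", 2)

def Spec_create_large_text_chunks (text : String) (target_chunks : Int) (out : List String) : Prop := out = create_large_text_chunks_alt text target_chunks
instance (text : String) (target_chunks : Int) (out : List String) : Decidable (Spec_create_large_text_chunks text target_chunks out) := by unfold Spec_create_large_text_chunks; infer_instance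

-- ===== CLAIM (what is proved, stated in full; the proofs are below) =====
def Claim_equal_create_large_text_chunks : Prop := ∀ (text : String) (target_chunks : Int), Dom_create_large_text_chunks text target_chunks → Pre_create_large_text_chunks text target_chunks → Spec_create_large_text_chunks text target_chunks (create_large_text_chunks text target_chunks)

-- ===== LEMMAS AND PROOFS =====

-- a finished chunk, built from an already-stripped group
def pvMk (cur : List String) : String :=
  let chunk_text := PySem.Str.join ". " cur
  let chunk_text := if chunk_text ≠ "" ∧ ¬ (PySem.Str.endswith chunk_text ".") then chunk_text ++ "." else chunk_text
  format_large_chunk chunk_text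

-- a finished chunk, built from a raw group of sentences
def pvChunk (g : List String) : String := pvMk (g.map PySem.Str.strip)

-- A's loop body, named
def pvStepA (spc n : Int) (st : List String × List String) (p : Int × String) : List String × List String :=
  let current_chunk := st.2 ++ [PySem.Str.strip p.2]
  if (current_chunk.length : Int) ≥ spc ∨ p.1 = n - 1 then
    if current_chunk ≠ [] then (st.1 ++ [pvMk current_chunk], [])
    else (st.1, current_chunk)
  else (st.1, current_chunk)

-- B's loop body, named
def pvStepB (spc : Int) (L : List String) (chunks : List String) (start : Int) : List String :=
  chunks ++ [pvChunk (PySem.List.slice L (some start) (some (start + spc)))]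

-- the groups-of-(k+1) decomposition of a list
def pvGroups (k : Nat) (f : List String → String) : List String → List String
  | [] => []
  | x :: xs => f (x :: xs.take k) :: pvGroups k f (xs.drop k)
termination_by l => l.length
decreasing_by simp

theorem pvGroups_cons (k : Nat) (f : List String → String) (x : String) (xs : List String) :
    pvGroups k f (x :: xs) = f ((x :: xs).take (k + 1)) :: pvGroups k f ((x :: xs).drop (k + 1)) := by
  rw [pvGroups]; simp

theorem pvGroups_small (k : Nat) (f : List String → String) (s : List String)
    (hne : s ≠ []) (hlen : s.length ≤ k + 1) : pvGroups k f s = [f s] := by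
  rcases s with _ | ⟨x, xs⟩
  · simp at hne
  · rw [pvGroups]
    simp at hlen
    rw [List.take_of_length_le (by omega), List.drop_eq_nil_of_le (by omega)]
    rw [pvGroups]

theorem pvGroups_cons' (k : Nat) (f : List String → String) (l : List String) (hne : l ≠ []) :
    pvGroups k f l = f (l.take (k + 1)) :: pvGroups k f (l.drop (k + 1)) := by
  rcases l with _ | ⟨x, xs⟩
  · simp at hne
  · exact pvGroups_cons k f x xs

theorem pvRange_pos_nil (a b s : Int) (hs : 0 < s) (h : b ≤ a) : PySem.List.pyRange a b s = [] := by
  rw [PySem.List.pyRange_of_pos a b hs]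
  simp [show ¬ a < b by omega]

theorem pvRange_pos_cons (a b s : Int) (hs : 0 < s) (h : a < b) :
    PySem.List.pyRange a b s = a :: PySem.List.pyRange (a + s) b s := by
  rw [PySem.List.pyRange_of_pos a b hs, PySem.List.pyRange_of_pos (a+s) b hs]
  by_cases h2 : a + s < b
  · have key : ((b - a + s - 1) / s) = ((b - (a+s) + s - 1) / s) + 1 := by
      have := Int.add_mul_ediv_right (b - (a+s) + s - 1) 1 (by omega : s ≠ 0)
      simp at this
      rw [← this]; ring_nf
    have hnn : 0 ≤ (b - (a+s) + s - 1) / s := Int.ediv_nonneg (by omega) (by omega)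
    rw [if_pos h, if_pos h2, key, Int.toNat_add hnn (by omega)]
    have h1 : ((1:Int)).toNat = 1 := rfl
    rw [h1, List.range_succ_eq_map]
    simp only [List.map_cons, List.map_map]
    refine List.cons_eq_cons.mpr ⟨by simp, ?_⟩
    apply List.map_congr_left; intro k hk; simp [Function.comp]; ring
  · have hlo : (1:Int) ≤ (b - a + s - 1) / s := by
      rw [Int.le_ediv_iff_mul_le hs]; omega
    have hhi : (b - a + s - 1) / s < 2 := by
      rw [Int.ediv_lt_iff_lt_mul hs]; omega
    have key : ((b - a + s - 1) / s) = 1 := by omega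
    rw [if_pos h, if_neg h2, key]
    simp

-- A's loop fills one group and flushes it at the group boundary or at the last index
theorem pvA_group (spc n : Int) (l cur acc : List String) (k : Int)
    (hne : l ≠ []) (hkn : k + l.length ≤ n)
    (hfit : (cur.length : Int) + l.length ≤ spc)
    (hflush : k + l.length = n ∨ (cur.length : Int) + l.length = spc) :
    List.foldl (pvStepA spc n) (acc, cur) (PySem.List.enumerate l k)
      = (acc ++ [pvMk (cur ++ l.map PySem.Str.strip)], []) := by
  induction l generalizing cur acc k with
  | nil => simp at hne
  | cons x xs ih =>
    rw [PySem.List.enumerate_cons, List.foldl_cons]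
    by_cases hxs : xs = []
    · subst hxs
      simp only [List.length_cons, List.length_nil] at hkn hfit hflush
      have hcond : ((cur ++ [PySem.Str.strip x]).length : Int) ≥ spc ∨ k = n - 1 := by
        simp only [List.length_append, List.length_cons, List.length_nil]
        push_cast at hflush ⊢
        omega
      simp only [pvStepA, if_pos hcond]
      simp [PySem.List.enumerate, pvMk]
    · have hxslen : 1 ≤ xs.length := by
        rcases xs with _ | _
        · simp at hxs
        · simp
      simp only [List.length_cons] at hkn hfit
      have hcond : ¬ (((cur ++ [PySem.Str.strip x]).length : Int) ≥ spc ∨ k = n - 1) := by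
        simp only [List.length_append, List.length_cons, List.length_nil]
        push_cast at hfit hkn ⊢
        omega
      simp only [pvStepA, if_neg hcond]
      rw [ih (cur ++ [PySem.Str.strip x]) acc (k + 1) hxs
        (by push_cast at hkn ⊢; omega)
        (by simp only [List.length_append, List.length_cons, List.length_nil]; push_cast at hfit ⊢; omega)
        (by simp only [List.length_append, List.length_cons, List.length_nil] at hflush ⊢
            push_cast at hflush ⊢
            rcases hflush with h | h
            · left; omega
            · right; omega)]
      simp

-- A's loop, group by group
theorem pvA_main (spc n : Int) (fuel : Nat) :
    ∀ (l acc : List String) (k : Int), 1 ≤ spc → l ≠ [] → k + l.length = n → l.length ≤ fuel →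
    List.foldl (pvStepA spc n) (acc, []) (PySem.List.enumerate l k)
      = (acc ++ pvGroups (spc.toNat - 1) pvChunk l, []) := by
  induction fuel with
  | zero =>
    intro l acc k _ hne _ hfuel
    rcases l with _ | _
    · simp at hne
    · simp at hfuel
  | succ fuel ih =>
    intro l acc k hspc hne hkn hfuel
    have hsp : spc.toNat - 1 + 1 = spc.toNat := by omega
    by_cases hsmall : (l.length : Int) ≤ spc
    · rw [pvA_group spc n l [] acc k hne (by omega) (by simpa using hsmall) (Or.inl hkn)]
      rw [pvGroups_small _ _ _ hne (by omega)]
      simp [pvChunk]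
    · have hglen : (l.take spc.toNat).length = spc.toNat := by
        simp; omega
      have htne : l.drop spc.toNat ≠ [] := by
        simp only [ne_eq, List.drop_eq_nil_iff]
        omega
      have hgne : l.take spc.toNat ≠ [] := by
        simp only [ne_eq, List.take_eq_nil_iff]
        rw [not_or]
        constructor <;> [omega; exact hne]
      conv_lhs => rw [← List.take_append_drop spc.toNat l]
      rw [PySem.List.enumerate_append, List.foldl_append]
      rw [pvA_group spc n (l.take spc.toNat) [] acc k hgne
        (by rw [hglen]; push_cast at hkn ⊢; omega)
        (by rw [hglen]; simp; omega)
        (by right; rw [hglen]; simp; omega)]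
      simp only [List.nil_append]
      rw [ih (l.drop spc.toNat)
        (acc ++ [pvMk (List.map PySem.Str.strip (l.take spc.toNat))]) (k + (l.take spc.toNat).length)
        hspc htne (by rw [hglen]; push_cast at hkn ⊢; simp; omega) (by simp; omega)]
      rw [pvGroups_cons' _ _ l hne, hsp]
      simp [pvChunk]

-- B's loop, group by group
theorem pvB_main (spc : Int) (L : List String) (fuel : Nat) :
    ∀ (acc : List String) (a : Int), 1 ≤ spc → 0 ≤ a → (L.length : Int) ≤ a + fuel →
    List.foldl (pvStepB spc L) acc (PySem.List.pyRange a (L.length : Int) spc)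
      = acc ++ pvGroups (spc.toNat - 1) pvChunk (L.drop a.toNat) := by
  induction fuel with
  | zero =>
    intro acc a hspc ha hfuel
    rw [pvRange_pos_nil _ _ _ (by omega) (by push_cast at hfuel; omega)]
    have : L.drop a.toNat = [] := List.drop_eq_nil_of_le (by omega)
    simp [this, pvGroups]
  | succ fuel ih =>
    intro acc a hspc ha hfuel
    have hsp : spc.toNat - 1 + 1 = spc.toNat := by omega
    by_cases hend : (L.length : Int) ≤ a
    · rw [pvRange_pos_nil _ _ _ (by omega) hend]
      have : L.drop a.toNat = [] := List.drop_eq_nil_of_le (by omega)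
      simp [this, pvGroups]
    · rw [not_le] at hend
      rw [pvRange_pos_cons _ _ _ (by omega) hend, List.foldl_cons]
      have hsl : PySem.List.slice L (some a) (some (a + spc)) = (L.drop a.toNat).take spc.toNat := by
        rw [PySem.List.slice_toNat L ha (by omega)]
        congr 1
        omega
      have hsne : L.drop a.toNat ≠ [] := by
        simp only [ne_eq, List.drop_eq_nil_iff]
        omega
      simp only [pvStepB, hsl]
      by_cases hnext : (L.length : Int) ≤ a + spc
      · rw [pvRange_pos_nil _ _ _ (by omega) hnext]
        have hslen : (L.drop a.toNat).length ≤ spc.toNat := by simp; omega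
        rw [pvGroups_small _ _ _ hsne (by omega), List.take_of_length_le hslen]
        simp
      · rw [not_le] at hnext
        rw [ih (acc ++ [pvChunk ((L.drop a.toNat).take spc.toNat)]) (a + spc)
          hspc (by omega) (by push_cast at hfuel ⊢; omega)]
        rw [pvGroups_cons' _ _ _ hsne, hsp]
        have : L.drop (a + spc).toNat = (L.drop a.toNat).drop spc.toNat := by
          rw [List.drop_drop]
          congr 1
          omega
        rw [this]
        simp

-- ===== VERDICT (by name: the statement is the Claim_ definition above) =====
theorem create_large_text_chunks_spec : Claim_equal_create_large_text_chunks := by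
  intro text target_chunks _ _
  unfold Spec_create_large_text_chunks create_large_text_chunks create_large_text_chunks_alt
  set L := (PySem.Str.split? text ". ").getD [] with hL
  set spc := max 1 (PySem.Int.floordiv (L.length : Int) target_chunks) with hspc
  have h1 : (1 : Int) ≤ spc := le_max_left _ _
  show (List.foldl (pvStepA spc (L.length : Int)) ([], []) (PySem.List.enumerate L 0)).1
      = List.foldl (pvStepB spc L) [] (PySem.List.pyRange 0 (L.length : Int) spc)
  rcases L with _ | ⟨x, xs⟩
  · simp [PySem.List.enumerate, pvRange_pos_nil 0 0 spc (by omega) le_rfl]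
  · rw [pvA_main spc _ (x :: xs).length (x :: xs) [] 0 h1 (by simp) (by push_cast; ring) le_rfl,
        pvB_main spc (x :: xs) (x :: xs).length [] 0 h1 le_rfl (by push_cast; omega)]
    simp
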